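-- pv_equiv track=rewrite | github.com/kamyu104/LeetCode-Solutions | Python/longest-alternating-subarray-after-removing-at-most-one-element.py | longestAlternating
-- ===== SOURCE A (Python) =====
-- def longestAlternating(nums):
--     """
--     :type nums: List[int]
--     :rtype: int
--     """
--     result = up1 = up0 = down1 = down0 = 1
--     for i in range(len(nums)-1):
--         if nums[i] < nums[i+1]:
--             up1, up0, down1, down0 = down1+1, down0+1, down0, 1
--         elif nums[i] > nums[i+1]:
--             up1, up0, down1, down0 = up0, 1, up1+1, up0+1
--         else:
--             up1, up0, down1, down0 = up0, 1, down0, 1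
--         result = max(result, up1, down1)
--     return result
-- ===== SOURCE B (Python) =====
-- def _sgn(a, b):
--     return (a < b) - (a > b)
--
-- def longestAlternating(nums):
--     """
--     :type nums: List[int]
--     :rtype: int
--     """
--     n = len(nums)
--     # end[i] = length of the longest strictly-alternating (zigzag) subarray
--     # ending at i; es[i] = sign of its last step (0 if length 1).
--     end = []
--     es = []
--     for i, v in enumerate(nums):
--         if i == 0:
--             end.append(1); es.append(0)
--         else:
--             s = _sgn(nums[i - 1], v)
--             if s == 0:
--                 end.append(1); es.append(0)
--             elif s != es[-1]:
--                 end.append(end[-1] + 1); es.append(s)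
--             else:
--                 end.append(2); es.append(s)
--     # start[i] = longest zigzag subarray starting at i; ss[i] = sign of its
--     # first step (0 if length 1).
--     start = [1] * n
--     ss = [0] * n
--     for i in range(n - 2, -1, -1):
--         s = _sgn(nums[i], nums[i + 1])
--         if s == 0:
--             start[i], ss[i] = 1, 0
--         elif s != ss[i + 1]:
--             start[i], ss[i] = start[i + 1] + 1, s
--         else:
--             start[i], ss[i] = 2, s
--     # no-removal answer (and the forced minimum of 1 for empty input)
--     result = max(end) if n else 1
--     # try removing each interior element j, joining the run ending at j-1
--     # with the run starting at j+1 across the step nums[j-1] -> nums[j+1]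
--     for j in range(1, n - 1):
--         s = _sgn(nums[j - 1], nums[j + 1])
--         if s != 0:
--             left = end[j - 1] if es[j - 1] != s else 1
--             right = start[j + 1] if ss[j + 1] != s else 1
--             result = max(result, left + right)
--     return result
-- ===== Notes on version B (the rewrite author's own statement) =====
-- stated objective: alternative
-- what changed: Replaces A's single forward 4-variable removal-DP by three separate linear scans: an end[] array (longest zigzag run ending at i), a start[] array computed right-to-left, and an explicit junction pass that tries removing each interior element and joining the adjacent runs.
import Mathlib
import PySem

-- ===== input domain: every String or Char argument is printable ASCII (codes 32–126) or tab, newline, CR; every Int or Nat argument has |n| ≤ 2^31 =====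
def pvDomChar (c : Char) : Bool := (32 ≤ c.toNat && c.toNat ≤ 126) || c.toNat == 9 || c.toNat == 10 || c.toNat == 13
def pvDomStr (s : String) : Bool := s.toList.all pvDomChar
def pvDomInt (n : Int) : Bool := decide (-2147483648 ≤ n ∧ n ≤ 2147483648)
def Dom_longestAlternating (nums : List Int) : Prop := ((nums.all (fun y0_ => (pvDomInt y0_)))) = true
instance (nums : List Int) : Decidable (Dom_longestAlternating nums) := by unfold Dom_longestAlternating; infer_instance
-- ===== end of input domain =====

-- B replaces A's forward 4-variable removal-DP by three linear scans (an end-run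
-- array, a start-run array built right-to-left, and an explicit junction pass
-- over the interior removal points); equivalence of the return values is proved
-- for all inputs.

-- ===== PORT A =====
-- the loop of A: state (result, up1, up0, down1, down0), walking adjacent pairs
def aLoop : Int → Int → Int → Int → Int → List Int → Int
  | r, u1, u0, d1, d0, x :: y :: rest =>
    if x < y then
      aLoop (max (max r (d1 + 1)) d0) (d1 + 1) (d0 + 1) d0 1 (y :: rest)
    else if y < x then
      aLoop (max (max r u0) (u1 + 1)) u0 1 (u1 + 1) (u0 + 1) (y :: rest)
    else
      aLoop (max (max r u0) d0) u0 1 d0 1 (y :: rest)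
  | r, _, _, _, _, _ => r

def longestAlternating (nums : List Int) : Int := aLoop 1 1 1 1 1 nums

-- ===== PORT B =====
-- Python's (a < b) - (a > b)
def sgnB (a b : Int) : Int := (if a < b then 1 else 0) - (if b < a then 1 else 0)

-- forward scan building the (end[i], es[i]) pairs (Source B's first loop)
def endAux : Int → Int → Int → List Int → List (Int × Int)
  | _, _, _, [] => []
  | prev, pe, ps, v :: rest =>
    let s := sgnB prev v
    let q : Int × Int := if s = 0 then (1, 0) else if s ≠ ps then (pe + 1, s) else (2, s)
    q :: endAux v q.1 q.2 rest

def endScan : List Int → List (Int × Int)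
  | [] => []
  | x :: rest => (1, 0) :: endAux x 1 0 rest

-- backward scan building the (start[i], ss[i]) pairs (Source B's second loop)
def startScan : List Int → List (Int × Int)
  | [] => []
  | [_] => [(1, 0)]
  | x :: y :: rest =>
    let t := startScan (y :: rest)
    let q : Int × Int :=
      match t with
      | (pe, ps) :: _ =>
        let s := sgnB x y
        if s = 0 then (1, 0) else if s ≠ ps then (pe + 1, s) else (2, s)
      | [] => (1, 0)
    q :: t

-- Source B's junction loop over interior removal points, walking the three lists in step
def junct : List Int → List (Int × Int) → List (Int × Int) → Int → Int
  | a :: b :: c :: rest, (pe, ps) :: etail, _ :: st1 :: (se, ss) :: stail, acc =>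
    let s := sgnB a c
    let acc' := if s ≠ 0 then
        max acc ((if ps ≠ s then pe else 1) + (if ss ≠ s then se else 1))
      else acc
    junct (b :: c :: rest) etail (st1 :: (se, ss) :: stail) acc'
  | _, _, _, acc => acc

def longestAlternating_alt (nums : List Int) : Int :=
  let E := endScan nums
  let S := startScan nums
  let r0 := match E with
    | [] => 1
    | p :: t => t.foldl (fun m q => max m q.1) p.1
  junct nums E S r0

-- ===== PRECONDITION & SPEC =====
def Spec_longestAlternating (nums : List Int) (out : Int) : Prop := out = longestAlternating_alt nums
instance (nums : List Int) (out : Int) : Decidable (Spec_longestAlternating nums out) := by unfold Spec_longestAlternating; infer_instance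

-- ===== CLAIM (what is proved, stated in full; the proofs are below) =====
def Claim_equal_longestAlternating : Prop := ∀ (nums : List Int), Dom_longestAlternating nums → Spec_longestAlternating nums (longestAlternating nums)

-- ===== LEMMAS AND PROOFS =====

-- proof-side notions: run growth, first-step sign, running max of the end-array
def ext : Int → Int → List Int → Int
  | _, _, [] => 0
  | d, c, y :: rest =>
    let s := sgnB c y
    if s ≠ 0 ∧ s ≠ d then 1 + ext s y rest else 0

def fsgn : Int → List Int → Int
  | _, [] => 0
  | c, y :: _ => sgnB c y

def maxEnds : Int → Int → Int → List Int → Int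
  | _, pe, _, [] => pe
  | x, pe, ps, y :: rest =>
    let s := sgnB x y
    let q : Int × Int := if s = 0 then (1, 0) else if s ≠ ps then (pe + 1, s) else (2, s)
    max pe (maxEnds y q.1 q.2 rest)

def uV (pe ps : Int) : Int := if ps = 1 then pe else 1
def dV (pe ps : Int) : Int := if ps = -1 then pe else 1

theorem sgnB_lt {a b : Int} (h : a < b) : sgnB a b = 1 := by
  simp [sgnB, h, not_lt.mpr (le_of_lt h)]

theorem sgnB_gt {a b : Int} (h : b < a) : sgnB a b = -1 := by
  simp [sgnB, h, not_lt.mpr (le_of_lt h)]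

theorem sgnB_eq {a b : Int} (h : a = b) : sgnB a b = 0 := by
  simp [sgnB, h]

theorem ext_nonneg : ∀ (l : List Int) (d c : Int), 0 ≤ ext d c l := by
  intro l
  induction l with
  | nil => intro d c; simp [ext]
  | cons y rest ih =>
    intro d c
    simp only [ext]
    split
    · have := ih (sgnB c y) y; omega
    · omega

theorem ext0_of_ne : ∀ (l : List Int) (c s : Int), s ≠ fsgn c l → ext s c l = ext 0 c l := by
  intro l
  cases l with
  | nil => intro c s h; rfl
  | cons y rest =>
    intro c s h
    simp only [fsgn] at h
    simp only [ext]
    by_cases h0 : sgnB c y = 0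
    · simp [h0]
    · simp [h0, Ne.symm h]

theorem ext_eq_zero_of_fsgn : ∀ (l : List Int) (c s : Int), s ≠ 0 → s = fsgn c l → ext s c l = 0 := by
  intro l
  cases l with
  | nil => intro c s h h'; rfl
  | cons y rest =>
    intro c s h h'
    simp only [fsgn] at h'
    simp only [ext]
    simp [← h']

-- the right-hand factor of a junction candidate, in ext form
theorem right_eq : ∀ (l : List Int) (z s : Int), s ≠ 0 →
    (if fsgn z l ≠ s then 1 + ext 0 z l else 1) = 1 + ext s z l := by
  intro l z s hs
  by_cases hf : fsgn z l = s
  · simp [hf, ext_eq_zero_of_fsgn l z s hs hf.symm]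
  · simp [hf, ext0_of_ne l z s (fun h => hf h.symm)]

theorem startScan_cons : ∀ (rest : List Int) (x : Int),
    startScan (x :: rest) = (1 + ext 0 x rest, fsgn x rest) :: startScan rest := by
  intro rest
  induction rest with
  | nil => intro x; simp [startScan, ext, fsgn]
  | cons y r ih =>
    intro x
    simp only [startScan, ih y]
    by_cases h0 : sgnB x y = 0
    · cases r <;> simp [h0, fsgn, ext]
    · by_cases hne : sgnB x y = fsgn y r
      · have hz := ext_eq_zero_of_fsgn r y _ h0 hne
        cases r with
        | nil => simp [fsgn] at hne; exact absurd hne h0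
        | cons z rr =>
          simp only [fsgn] at hne hz ⊢
          have hyz : ¬ sgnB y z = 0 := by rw [← hne]; exact h0
          simp [hne, ext, hyz]
      · have he := ext0_of_ne r y _ hne
        cases r with
        | nil => simp [fsgn] at hne ⊢; simp [h0, hne, ext]
        | cons z rr =>
          simp only [fsgn] at hne he ⊢
          have h2 : ¬ sgnB y z = sgnB x y := fun h => hne h.symm
          simp only [ext]
          split_ifs <;> simp_all <;> omega

theorem maxEnds_ge_pe : ∀ (l : List Int) (x pe ps : Int), pe ≤ maxEnds x pe ps l := by
  intro l
  induction l with
  | nil => intro x pe ps; simp [maxEnds]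
  | cons y rest ih =>
    intro x pe ps
    simp only [maxEnds]
    omega

theorem ext_le_maxEnds : ∀ (l : List Int) (x pe ps : Int), 1 ≤ pe →
    pe + ext ps x l ≤ maxEnds x pe ps l := by
  intro l
  induction l with
  | nil => intro x pe ps h; simp [ext, maxEnds]
  | cons y rest ih =>
    intro x pe ps h
    have g1 := maxEnds_ge_pe rest y 1 0
    have g2 := maxEnds_ge_pe rest y 2 (sgnB x y)
    have ih1 := ih y (pe + 1) (sgnB x y) (by omega)
    simp only [ext, maxEnds]
    split_ifs <;> simp_all <;> omega

theorem ext_le_maxEnds_one : ∀ (l : List Int) (x d ps : Int),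
    1 + ext d x l ≤ maxEnds x 1 ps l := by
  intro l
  cases l with
  | nil => intro x d ps; simp [ext, maxEnds]
  | cons y rest =>
    intro x d ps
    have g1 := maxEnds_ge_pe rest y 1 0
    have g2 := ext_le_maxEnds rest y 2 (sgnB x y) (by omega)
    simp only [ext, maxEnds]
    split_ifs <;> simp_all <;> omega

theorem foldl_endAux : ∀ (l : List Int) (x pe ps a : Int), pe ≤ a →
    List.foldl (fun m q => max m q.1) a (endAux x pe ps l) = max a (maxEnds x pe ps l) := by
  intro l
  induction l with
  | nil => intro x pe ps a h; simp only [endAux, maxEnds, List.foldl]; omega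
  | cons y rest ih =>
    intro x pe ps a h
    simp only [endAux, maxEnds, List.foldl]
    split_ifs with h1 h2
    · simp only [show ∀ a b : Int, ((a, b).1 : Int) = a from fun _ _ => rfl,
        show ∀ a b : Int, ((a, b).2 : Int) = b from fun _ _ => rfl]
      rw [ih y 1 0 (max a 1) (by omega)]
      have := maxEnds_ge_pe rest y 1 0
      omega
    · simp only [show ∀ a b : Int, ((a, b).1 : Int) = a from fun _ _ => rfl,
        show ∀ a b : Int, ((a, b).2 : Int) = b from fun _ _ => rfl]
      rw [ih y (pe + 1) (sgnB x y) (max a (pe + 1)) (by omega)]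
      have := maxEnds_ge_pe rest y (pe + 1) (sgnB x y)
      omega
    · simp only [show ∀ a b : Int, ((a, b).1 : Int) = a from fun _ _ => rfl,
        show ∀ a b : Int, ((a, b).2 : Int) = b from fun _ _ => rfl]
      rw [ih y 2 (sgnB x y) (max a 2) (by omega)]
      have := maxEnds_ge_pe rest y 2 (sgnB x y)
      omega

theorem junct_acc : ∀ (l : List Int) (E S : List (Int × Int)) (a b : Int),
    junct l E S (max a b) = max a (junct l E S b) := by
  intro l
  induction l with
  | nil => intro E S a b; simp [junct]
  | cons p l ih =>
    intro E S a b
    cases l with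
    | nil => simp [junct]
    | cons q l2 =>
      cases l2 with
      | nil => simp [junct]
      | cons c l3 =>
        cases E with
        | nil => simp [junct]
        | cons e etail =>
          obtain ⟨pe, ps⟩ := e
          cases S with
          | nil => simp [junct]
          | cons s0 S1 =>
            cases S1 with
            | nil => simp [junct]
            | cons st1 S2 =>
              cases S2 with
              | nil => simp [junct]
              | cons s2 S3 =>
                obtain ⟨se, ss⟩ := s2
                simp only [junct]
                by_cases hc : sgnB p c = 0
                · simp only [hc]
                  norm_num
                  exact ih _ _ _ _
                · simp only [if_pos hc]
                  rw [max_assoc]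
                  exact ih _ _ _ _

theorem aLoop_ge_r : ∀ (l : List Int) (r u1 u0 d1 d0 : Int), r ≤ aLoop r u1 u0 d1 d0 l := by
  intro l
  induction l with
  | nil => intro r u1 u0 d1 d0; simp [aLoop]
  | cons x l ih =>
    intro r u1 u0 d1 d0
    cases l with
    | nil => simp [aLoop]
    | cons y l2 =>
      simp only [aLoop]
      split_ifs with h1 h2
      · have := ih (max (max r (d1 + 1)) d0) (d1 + 1) (d0 + 1) d0 1; omega
      · have := ih (max (max r u0) (u1 + 1)) u0 1 (u1 + 1) (u0 + 1); omega
      · have := ih (max (max r u0) d0) u0 1 d0 1; omega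

-- chain realization: A's pending one-removal chains reach their full value
theorem chains_le_aLoop : ∀ (l : List Int) (x r u1 u0 d1 d0 : Int), u1 ≤ r → d1 ≤ r →
    u1 + ext 1 x l ≤ aLoop r u1 u0 d1 d0 (x :: l) ∧
    d1 + ext (-1) x l ≤ aLoop r u1 u0 d1 d0 (x :: l) := by
  intro l
  induction l with
  | nil =>
    intro x r u1 u0 d1 d0 hu hd
    simp only [aLoop, ext]
    omega
  | cons y l2 ih =>
    intro x r u1 u0 d1 d0 hu hd
    rcases lt_trichotomy x y with h | h | h
    · have hs := sgnB_lt h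
      have IH := ih y (max (max r (d1 + 1)) d0) (d1 + 1) (d0 + 1) d0 1 (by omega) (by omega)
      have A1 := aLoop_ge_r (y :: l2) (max (max r (d1 + 1)) d0) (d1 + 1) (d0 + 1) d0 1
      simp only [aLoop, if_pos h, ext, hs,
        if_neg (by decide : ¬((1:Int) ≠ 0 ∧ (1:Int) ≠ 1)),
        if_pos (by decide : ((1:Int) ≠ 0 ∧ (1:Int) ≠ -1))]
      omega
    · have hs := sgnB_eq h
      have A1 := aLoop_ge_r (y :: l2) (max (max r u0) d0) u0 1 d0 1
      simp only [aLoop, if_neg (by omega : ¬ x < y), if_neg (by omega : ¬ y < x), ext, hs,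
        if_neg (by decide : ¬((0:Int) ≠ 0 ∧ (0:Int) ≠ 1)),
        if_neg (by decide : ¬((0:Int) ≠ 0 ∧ (0:Int) ≠ -1))]
      omega
    · have hs := sgnB_gt h
      have IH := ih y (max (max r u0) (u1 + 1)) u0 1 (u1 + 1) (u0 + 1) (by omega) (by omega)
      have A1 := aLoop_ge_r (y :: l2) (max (max r u0) (u1 + 1)) u0 1 (u1 + 1) (u0 + 1)
      simp only [aLoop, if_neg (by omega : ¬ x < y), if_pos h, ext, hs,
        if_pos (by decide : ((-1:Int) ≠ 0 ∧ (-1:Int) ≠ 1)),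
        if_neg (by decide : ¬((-1:Int) ≠ 0 ∧ (-1:Int) ≠ -1))]
      omega

theorem maxEnds_le_aLoop : ∀ (l : List Int) (x r u1 u0 d1 d0 pe ps : Int),
    u0 = uV pe ps → d0 = dV pe ps → 1 ≤ pe → (ps = 0 → pe = 1) →
    (ps = 1 ∨ ps = 0 ∨ ps = -1) →
    u0 ≤ u1 → d0 ≤ d1 → u1 ≤ r → d1 ≤ r → pe ≤ r →
    maxEnds x pe ps l ≤ aLoop r u1 u0 d1 d0 (x :: l) := by
  intro l
  induction l with
  | nil =>
    intro x r u1 u0 d1 d0 pe ps hu0 hd0 hpe hps0 hps3 h1 h2 h3 h4 h5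
    simp only [maxEnds, aLoop]; omega
  | cons y l2 ih =>
    intro x r u1 u0 d1 d0 pe ps hu0 hd0 hpe hps0 hps3 h1 h2 h3 h4 h5
    simp only [uV, dV] at hu0 hd0
    rcases lt_trichotomy x y with h | h | h
    · have hs := sgnB_lt h
      have hq : (if sgnB x y = 0 then ((1:Int), (0:Int)) else if sgnB x y ≠ ps then (pe + 1, sgnB x y) else (2, sgnB x y)) = (d0 + 1, 1) := by
        rcases hps3 with h' | h' | h' <;> subst h' <;> simp_all <;> omega
      have IH := ih y (max (max r (d1 + 1)) d0) (d1 + 1) (d0 + 1) d0 1 (d0 + 1) 1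
        (by simp [uV]) (by simp [dV]) (by omega) (by omega) (by tauto)
        (by omega) (by omega) (by omega) (by omega) (by omega)
      have A1 := aLoop_ge_r (y :: l2) (max (max r (d1 + 1)) d0) (d1 + 1) (d0 + 1) d0 1
      simp only [maxEnds, hq, aLoop, if_pos h]
      omega
    · have hs := sgnB_eq h
      have hq : (if sgnB x y = 0 then ((1:Int), (0:Int)) else if sgnB x y ≠ ps then (pe + 1, sgnB x y) else (2, sgnB x y)) = (1, 0) := by
        simp [hs]
      have IH := ih y (max (max r u0) d0) u0 1 d0 1 1 0
        (by simp [uV]) (by simp [dV]) (by omega) (by omega) (by tauto)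
        (by omega) (by omega) (by omega) (by omega) (by omega)
      have A1 := aLoop_ge_r (y :: l2) (max (max r u0) d0) u0 1 d0 1
      simp only [maxEnds, hq, aLoop, if_neg (by omega : ¬ x < y), if_neg (by omega : ¬ y < x)]
      omega
    · have hs := sgnB_gt h
      have hq : (if sgnB x y = 0 then ((1:Int), (0:Int)) else if sgnB x y ≠ ps then (pe + 1, sgnB x y) else (2, sgnB x y)) = (u0 + 1, -1) := by
        rcases hps3 with h' | h' | h' <;> subst h' <;> simp_all <;> omega
      have IH := ih y (max (max r u0) (u1 + 1)) u0 1 (u1 + 1) (u0 + 1) (u0 + 1) (-1)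
        (by simp [uV]) (by simp [dV]) (by omega) (by omega) (by tauto)
        (by omega) (by omega) (by omega) (by omega) (by omega)
      have A1 := aLoop_ge_r (y :: l2) (max (max r u0) (u1 + 1)) u0 1 (u1 + 1) (u0 + 1)
      simp only [maxEnds, hq, aLoop, if_neg (by omega : ¬ x < y), if_pos h]
      omega

theorem pFst (a b : Int) : ((a, b).1 : Int) = a := rfl
theorem pSnd (a b : Int) : ((a, b).2 : Int) = b := rfl

theorem left_one (pe ps d0 : Int) (hd0 : d0 = dV pe ps) (hps0 : ps = 0 → pe = 1)
    (hps3 : ps = 1 ∨ ps = 0 ∨ ps = -1) : (if ps ≠ (1:Int) then pe else 1) = d0 := by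
  unfold dV at hd0
  rcases hps3 with hh | hh | hh <;> subst hh <;> simp_all

theorem left_neg (pe ps u0 : Int) (hu0 : u0 = uV pe ps) (hps0 : ps = 0 → pe = 1)
    (hps3 : ps = 1 ∨ ps = 0 ∨ ps = -1) : (if ps ≠ (-1:Int) then pe else 1) = u0 := by
  unfold uV at hu0
  rcases hps3 with hh | hh | hh <;> subst hh <;> simp_all

theorem uV_le_add (pe ps d1 : Int) (hd1 : 0 ≤ d1) (h : ps = 1 → pe - 1 ≤ d1) : uV pe ps ≤ d1 + 1 := by
  unfold uV; split_ifs with hh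
  · have := h hh; omega
  · omega

theorem dV_le_add (pe ps u1 : Int) (hu1 : 0 ≤ u1) (h : ps = -1 → pe - 1 ≤ u1) : dV pe ps ≤ u1 + 1 := by
  unfold dV; split_ifs with hh
  · have := h hh; omega
  · omega

set_option maxHeartbeats 1600000 in
theorem junct_le_aLoop : ∀ (l : List Int) (x r u1 u0 d1 d0 pe ps : Int),
    u0 = uV pe ps → d0 = dV pe ps → 1 ≤ pe → (ps = 0 → pe = 1) →
    (ps = 1 ∨ ps = 0 ∨ ps = -1) →
    u0 ≤ u1 → d0 ≤ d1 → u1 ≤ r → d1 ≤ r →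
    (ps = -1 → pe - 1 ≤ u1) → (ps = 1 → pe - 1 ≤ d1) →
    junct (x :: l) ((pe, ps) :: endAux x pe ps l) (startScan (x :: l)) 1 ≤
      aLoop r u1 u0 d1 d0 (x :: l) := by
  intro l
  induction l with
  | nil =>
    intro x r u1 u0 d1 d0 pe ps hu0 hd0 hpe hps0 hps3 h1 h2 h3 h4 h5 h6
    have hu01 : 1 ≤ u0 := by rcases hps3 with h' | h' | h' <;> simp [uV, h'] at hu0 <;> omega
    have := aLoop_ge_r [x] r u1 u0 d1 d0
    simp only [endAux, startScan, junct]
    omega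
  | cons y l2 ih =>
    intro x r u1 u0 d1 d0 pe ps hu0 hd0 hpe hps0 hps3 h1 h2 h3 h4 h5 h6
    have hu01 : 1 ≤ u0 := by rcases hps3 with h' | h' | h' <;> simp [uV, h'] at hu0 <;> omega
    have hd01 : 1 ≤ d0 := by rcases hps3 with h' | h' | h' <;> simp [dV, h'] at hd0 <;> omega
    cases l2 with
    | nil =>
      have := aLoop_ge_r (x :: [y]) r u1 u0 d1 d0
      simp only [junct]
      omega
    | cons z l3 =>
      rw [startScan_cons, startScan_cons, startScan_cons]
      rcases lt_trichotomy x y with h | h | h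
      · -- x < y : up step
        have hs1 := sgnB_lt h
        have hq : (if sgnB x y = 0 then ((1:Int), (0:Int)) else if sgnB x y ≠ ps then (pe + 1, sgnB x y) else (2, sgnB x y)) = (d0 + 1, 1) := by
          rcases hps3 with h' | h' | h' <;> subst h' <;> simp_all [uV, dV] <;> omega
        simp only [endAux, hq, pFst, pSnd]
        simp only [junct]
        rw [show (if sgnB x z ≠ 0 then max 1 ((if ps ≠ sgnB x z then pe else 1) + (if fsgn z l3 ≠ sgnB x z then 1 + ext 0 z l3 else 1)) else 1)
              = max (if sgnB x z ≠ 0 then ((if ps ≠ sgnB x z then pe else 1) + (if fsgn z l3 ≠ sgnB x z then 1 + ext 0 z l3 else 1)) else 1) 1 from by split_ifs <;> omega]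
        rw [junct_acc]
        have hALoop : aLoop r u1 u0 d1 d0 (x :: y :: z :: l3) = aLoop (max (max r (d1 + 1)) d0) (d1 + 1) (d0 + 1) d0 1 (y :: z :: l3) := by
          simp only [aLoop, if_pos h]
        rw [hALoop]
        have IH := ih y (max (max r (d1 + 1)) d0) (d1 + 1) (d0 + 1) d0 1 (d0 + 1) 1
          (by simp [uV]) (by simp [dV]) (by omega) (by omega) (by tauto)
          (by omega) (by omega) (by omega) (by omega) (by omega) (by omega)
        rw [startScan_cons, startScan_cons] at IH
        apply max_le _ IH
        -- candidate bound
        by_cases hxz : sgnB x z = 0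
        · have := aLoop_ge_r (y :: z :: l3) (max (max r (d1 + 1)) d0) (d1 + 1) (d0 + 1) d0 1
          simp only [hxz, if_neg (by decide : ¬((0:Int) ≠ 0))]
          omega
        · rcases lt_trichotomy y z with h' | h' | h'
          · -- y < z, so x < z : candidate realized by the chain d1' = d0 after one step
            have hs2 := sgnB_lt h'
            have hsxz := sgnB_lt (lt_trans h h')
            have hleft := left_one pe ps d0 hd0 hps0 hps3
            have hCh := (chains_le_aLoop (z :: l3) y (max (max r (d1 + 1)) d0) (d1 + 1) (d0 + 1) d0 1 (by omega) (by omega)).2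
            have hext : ext (-1) y (z :: l3) = 1 + ext 1 z l3 := by
              simp [ext, hs2]
            rw [right_eq l3 z _ hxz, hsxz, hleft]
            rw [hext] at hCh
            omega
          · -- y = z : x < z : two steps, flat then chain u1'' = d0 + 1
            have hs2 := sgnB_eq h'
            have hsxz : sgnB x z = 1 := by rw [← h']; exact hs1
            have hleft := left_one pe ps d0 hd0 hps0 hps3
            have hA2 : aLoop (max (max r (d1 + 1)) d0) (d1 + 1) (d0 + 1) d0 1 (y :: z :: l3)
                = aLoop (max (max (max (max r (d1 + 1)) d0) (d0 + 1)) 1) (d0 + 1) 1 1 1 (z :: l3) := by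
              simp only [aLoop, if_neg (by omega : ¬ y < z), if_neg (by omega : ¬ z < y)]
            have hCh := (chains_le_aLoop l3 z (max (max (max (max r (d1 + 1)) d0) (d0 + 1)) 1) (d0 + 1) 1 1 1 (by omega) (by omega)).1
            rw [right_eq l3 z _ hxz, hsxz, hleft, hA2]
            omega
          · -- z < y : x vs z undetermined
            have hs2 := sgnB_gt h'
            have hA2 : aLoop (max (max r (d1 + 1)) d0) (d1 + 1) (d0 + 1) d0 1 (y :: z :: l3)
                = aLoop (max (max (max (max r (d1 + 1)) d0) (d0 + 1)) (d1 + 1 + 1)) (d0 + 1) 1 (d1 + 1 + 1) (d0 + 1 + 1) (z :: l3) := by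
              simp only [aLoop, if_neg (by omega : ¬ y < z), if_pos h']
            rcases lt_trichotomy x z with h'' | h'' | h''
            · have hsxz := sgnB_lt h''
              have hleft := left_one pe ps d0 hd0 hps0 hps3
              have hCh := (chains_le_aLoop l3 z (max (max (max (max r (d1 + 1)) d0) (d0 + 1)) (d1 + 1 + 1)) (d0 + 1) 1 (d1 + 1 + 1) (d0 + 1 + 1) (by omega) (by omega)).1
              rw [right_eq l3 z _ hxz, hsxz, hleft, hA2]
              omega
            · exact absurd (sgnB_eq h'') hxz
            · have hsxz := sgnB_gt h''
              have hleft := left_neg pe ps u0 hu0 hps0 hps3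
              have hCh := (chains_le_aLoop l3 z (max (max (max (max r (d1 + 1)) d0) (d0 + 1)) (d1 + 1 + 1)) (d0 + 1) 1 (d1 + 1 + 1) (d0 + 1 + 1) (by omega) (by omega)).2
              have hu0d1 : u0 ≤ d1 + 1 := hu0 ▸ uV_le_add pe ps d1 (by omega) h6
              rw [right_eq l3 z _ hxz, hsxz, hleft, hA2]
              omega
      · -- x = y : flat step
        have hs1 := sgnB_eq h
        have hq : (if sgnB x y = 0 then ((1:Int), (0:Int)) else if sgnB x y ≠ ps then (pe + 1, sgnB x y) else (2, sgnB x y)) = (1, 0) := by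
          simp [hs1]
        simp only [endAux, hq, pFst, pSnd]
        simp only [junct]
        rw [show (if sgnB x z ≠ 0 then max 1 ((if ps ≠ sgnB x z then pe else 1) + (if fsgn z l3 ≠ sgnB x z then 1 + ext 0 z l3 else 1)) else 1)
              = max (if sgnB x z ≠ 0 then ((if ps ≠ sgnB x z then pe else 1) + (if fsgn z l3 ≠ sgnB x z then 1 + ext 0 z l3 else 1)) else 1) 1 from by split_ifs <;> omega]
        rw [junct_acc]
        have hALoop : aLoop r u1 u0 d1 d0 (x :: y :: z :: l3) = aLoop (max (max r u0) d0) u0 1 d0 1 (y :: z :: l3) := by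
          simp only [aLoop, if_neg (by omega : ¬ x < y), if_neg (by omega : ¬ y < x)]
        rw [hALoop]
        have IH := ih y (max (max r u0) d0) u0 1 d0 1 1 0
          (by simp [uV]) (by simp [dV]) (by omega) (by omega) (by tauto)
          (by omega) (by omega) (by omega) (by omega) (by omega) (by omega)
        rw [startScan_cons, startScan_cons] at IH
        apply max_le _ IH
        by_cases hxz : sgnB x z = 0
        · have := aLoop_ge_r (y :: z :: l3) (max (max r u0) d0) u0 1 d0 1
          simp only [hxz, if_neg (by decide : ¬((0:Int) ≠ 0))]
          omega
        · rcases lt_trichotomy y z with h' | h' | h'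
          · -- x = y < z : sgn x z = 1
            have hs2 := sgnB_lt h'
            have hsxz := sgnB_lt (h ▸ h')
            have hleft := left_one pe ps d0 hd0 hps0 hps3
            have hA2 : aLoop (max (max r u0) d0) u0 1 d0 1 (y :: z :: l3)
                = aLoop (max (max (max (max r u0) d0) (d0 + 1)) 1) (d0 + 1) (1 + 1) 1 1 (z :: l3) := by
              simp only [aLoop, if_pos h']
            have hCh := (chains_le_aLoop l3 z (max (max (max (max r u0) d0) (d0 + 1)) 1) (d0 + 1) (1 + 1) 1 1 (by omega) (by omega)).1
            rw [right_eq l3 z _ hxz, hsxz, hleft, hA2]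
            omega
          · exact absurd (sgnB_eq (h.trans h')) hxz
          · -- z < y = x : sgn x z = -1
            have hs2 := sgnB_gt h'
            have hsxz := sgnB_gt (h ▸ h')
            have hleft := left_neg pe ps u0 hu0 hps0 hps3
            have hA2 : aLoop (max (max r u0) d0) u0 1 d0 1 (y :: z :: l3)
                = aLoop (max (max (max (max r u0) d0) 1) (u0 + 1)) 1 1 (u0 + 1) (1 + 1) (z :: l3) := by
              simp only [aLoop, if_neg (by omega : ¬ y < z), if_pos h']
            have hCh := (chains_le_aLoop l3 z (max (max (max (max r u0) d0) 1) (u0 + 1)) 1 1 (u0 + 1) (1 + 1) (by omega) (by omega)).2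
            rw [right_eq l3 z _ hxz, hsxz, hleft, hA2]
            omega
      · -- y < x : down step
        have hs1 := sgnB_gt h
        have hq : (if sgnB x y = 0 then ((1:Int), (0:Int)) else if sgnB x y ≠ ps then (pe + 1, sgnB x y) else (2, sgnB x y)) = (u0 + 1, -1) := by
          rcases hps3 with h' | h' | h' <;> subst h' <;> simp_all [uV, dV] <;> omega
        simp only [endAux, hq, pFst, pSnd]
        simp only [junct]
        rw [show (if sgnB x z ≠ 0 then max 1 ((if ps ≠ sgnB x z then pe else 1) + (if fsgn z l3 ≠ sgnB x z then 1 + ext 0 z l3 else 1)) else 1)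
              = max (if sgnB x z ≠ 0 then ((if ps ≠ sgnB x z then pe else 1) + (if fsgn z l3 ≠ sgnB x z then 1 + ext 0 z l3 else 1)) else 1) 1 from by split_ifs <;> omega]
        rw [junct_acc]
        have hALoop : aLoop r u1 u0 d1 d0 (x :: y :: z :: l3) = aLoop (max (max r u0) (u1 + 1)) u0 1 (u1 + 1) (u0 + 1) (y :: z :: l3) := by
          simp only [aLoop, if_neg (by omega : ¬ x < y), if_pos h]
        rw [hALoop]
        have IH := ih y (max (max r u0) (u1 + 1)) u0 1 (u1 + 1) (u0 + 1) (u0 + 1) (-1)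
          (by simp [uV]) (by simp [dV]) (by omega) (by omega) (by tauto)
          (by omega) (by omega) (by omega) (by omega) (by omega) (by omega)
        rw [startScan_cons, startScan_cons] at IH
        apply max_le _ IH
        by_cases hxz : sgnB x z = 0
        · have := aLoop_ge_r (y :: z :: l3) (max (max r u0) (u1 + 1)) u0 1 (u1 + 1) (u0 + 1)
          simp only [hxz, if_neg (by decide : ¬((0:Int) ≠ 0))]
          omega
        · rcases lt_trichotomy y z with h' | h' | h'
          · -- y < z and y < x : x vs z undetermined
            have hs2 := sgnB_lt h'
            have hA2 : aLoop (max (max r u0) (u1 + 1)) u0 1 (u1 + 1) (u0 + 1) (y :: z :: l3)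
                = aLoop (max (max (max (max r u0) (u1 + 1)) (u1 + 1 + 1)) (u0 + 1)) (u1 + 1 + 1) (u0 + 1 + 1) (u0 + 1) 1 (z :: l3) := by
              simp only [aLoop, if_pos h']
            rcases lt_trichotomy x z with h'' | h'' | h''
            · have hsxz := sgnB_lt h''
              have hleft := left_one pe ps d0 hd0 hps0 hps3
              have hCh := (chains_le_aLoop l3 z (max (max (max (max r u0) (u1 + 1)) (u1 + 1 + 1)) (u0 + 1)) (u1 + 1 + 1) (u0 + 1 + 1) (u0 + 1) 1 (by omega) (by omega)).1
              have hd0u1 : d0 ≤ u1 + 1 := hd0 ▸ dV_le_add pe ps u1 (by omega) h5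
              rw [right_eq l3 z _ hxz, hsxz, hleft, hA2]
              omega
            · exact absurd (sgnB_eq h'') hxz
            · have hsxz := sgnB_gt h''
              have hleft := left_neg pe ps u0 hu0 hps0 hps3
              have hCh := (chains_le_aLoop l3 z (max (max (max (max r u0) (u1 + 1)) (u1 + 1 + 1)) (u0 + 1)) (u1 + 1 + 1) (u0 + 1 + 1) (u0 + 1) 1 (by omega) (by omega)).2
              rw [right_eq l3 z _ hxz, hsxz, hleft, hA2]
              omega
          · -- y = z < x : sgn x z = -1
            have hs2 := sgnB_eq h'
            have hsxz : sgnB x z = -1 := by rw [← h']; exact hs1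
            have hleft := left_neg pe ps u0 hu0 hps0 hps3
            have hA2 : aLoop (max (max r u0) (u1 + 1)) u0 1 (u1 + 1) (u0 + 1) (y :: z :: l3)
                = aLoop (max (max (max (max r u0) (u1 + 1)) 1) (u0 + 1)) 1 1 (u0 + 1) 1 (z :: l3) := by
              simp only [aLoop, if_neg (by omega : ¬ y < z), if_neg (by omega : ¬ z < y)]
            have hCh := (chains_le_aLoop l3 z (max (max (max (max r u0) (u1 + 1)) 1) (u0 + 1)) 1 1 (u0 + 1) 1 (by omega) (by omega)).2
            rw [right_eq l3 z _ hxz, hsxz, hleft, hA2]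
            omega
          · -- z < y < x : sgn x z = -1
            have hs2 := sgnB_gt h'
            have hsxz := sgnB_gt (lt_trans h' h)
            have hleft := left_neg pe ps u0 hu0 hps0 hps3
            have hCh := (chains_le_aLoop (z :: l3) y (max (max r u0) (u1 + 1)) u0 1 (u1 + 1) (u0 + 1) (by omega) (by omega)).1
            have hext : ext 1 y (z :: l3) = 1 + ext (-1) z l3 := by
              simp [ext, hs2]
            rw [right_eq l3 z _ hxz, hsxz, hleft]
            rw [hext] at hCh
            omega



theorem uV_le_pe (pe ps : Int) (h : 1 ≤ pe) : uV pe ps ≤ pe := by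
  unfold uV; split_ifs <;> omega

theorem dV_le_pe (pe ps : Int) (h : 1 ≤ pe) : dV pe ps ≤ pe := by
  unfold dV; split_ifs <;> omega

theorem junct_ge_acc : ∀ (l : List Int) (E S : List (Int × Int)) (acc : Int),
    acc ≤ junct l E S acc := by
  intro l E S acc
  have h := junct_acc l E S acc acc
  rw [show max acc acc = acc from by omega] at h
  omega

theorem junct_mono : ∀ (l : List Int) (E S : List (Int × Int)) (a b : Int), a ≤ b →
    junct l E S a ≤ junct l E S b := by
  intro l E S a b h
  have h2 := junct_acc l E S b a
  rw [show max b a = b from by omega] at h2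
  omega

theorem junct_cons_ge : ∀ (l : List Int) (E S : List (Int × Int)) (a : Int) (e s : Int × Int) (acc : Int),
    junct l E S acc ≤ junct (a :: l) (e :: E) (s :: S) acc := by
  intro l E S a e s acc
  obtain ⟨pe, ps⟩ := e
  cases l with
  | nil => simp [junct]
  | cons b l1 =>
    cases l1 with
    | nil => simp [junct]
    | cons c r =>
      cases S with
      | nil => simp [junct]
      | cons s1 S' =>
        cases S' with
        | nil => simp [junct]
        | cons s2 S'' =>
          obtain ⟨se, ss⟩ := s2
          simp only [junct]
          refine le_trans (junct_mono (b :: c :: r) E (s1 :: (se, ss) :: S'') acc _ ?_) (le_refl _)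
          split_ifs <;> omega

theorem junct_head : ∀ (r : List Int) (a b c : Int) (pe ps : Int) (E : List (Int × Int))
    (s0 s1 : Int × Int) (se ss : Int) (S : List (Int × Int)),
    (if sgnB a c ≠ 0 then (if ps ≠ sgnB a c then pe else 1) + (if ss ≠ sgnB a c then se else 1) else 1)
      ≤ junct (a :: b :: c :: r) ((pe, ps) :: E) (s0 :: s1 :: (se, ss) :: S) 1 := by
  intro r a b c pe ps E s0 s1 se ss S
  simp only [junct]
  refine le_trans ?_ (junct_ge_acc _ _ _ _)
  split_ifs <;> omega

theorem uV_ge_one (pe ps : Int) (h : 1 ≤ pe) : 1 ≤ uV pe ps := by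
  unfold uV; split_ifs <;> omega

theorem dV_ge_one (pe ps : Int) (h : 1 ≤ pe) : 1 ≤ dV pe ps := by
  unfold dV; split_ifs <;> omega

set_option maxHeartbeats 1600000 in
theorem aLoop_le : ∀ (l : List Int) (x r u1 u0 d1 d0 pe ps K : Int),
    u0 = uV pe ps → d0 = dV pe ps → 1 ≤ pe → (ps = 0 → pe = 1) →
    (ps = 1 ∨ ps = 0 ∨ ps = -1) →
    1 ≤ u1 → 1 ≤ d1 →
    r ≤ K → u1 + ext 1 x l ≤ K → d1 + ext (-1) x l ≤ K →
    maxEnds x pe ps l ≤ K →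
    junct (x :: l) ((pe, ps) :: endAux x pe ps l) (startScan (x :: l)) 1 ≤ K →
    aLoop r u1 u0 d1 d0 (x :: l) ≤ K := by
  intro l
  induction l with
  | nil =>
    intro x r u1 u0 d1 d0 pe ps K hu0 hd0 hpe hps0 hps3 hu1 hd1 hrK huK hdK hME hJ
    simp only [aLoop]; omega
  | cons y l2 ih =>
    intro x r u1 u0 d1 d0 pe ps K hu0 hd0 hpe hps0 hps3 hu1 hd1 hrK huK hdK hME hJ
    have hpeK : pe ≤ K := le_trans (maxEnds_ge_pe (y :: l2) x pe ps) hME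
    have hu0pe : u0 ≤ pe := hu0 ▸ uV_le_pe pe ps hpe
    have hd0pe : d0 ≤ pe := hd0 ▸ dV_le_pe pe ps hpe
    have hu01 : 1 ≤ u0 := hu0 ▸ uV_ge_one pe ps hpe
    have hd01 : 1 ≤ d0 := hd0 ▸ dV_ge_one pe ps hpe
    have he1 := ext_nonneg l2 1 y
    have he2 := ext_nonneg l2 (-1) y
    rw [startScan_cons] at hJ
    rcases lt_trichotomy x y with h | h | h
    · -- x < y : up step
      have hs1 := sgnB_lt h
      have hextd : ext (-1) x (y :: l2) = 1 + ext 1 y l2 := by simp [ext, hs1]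
      have hq : (if sgnB x y = 0 then ((1:Int), (0:Int)) else if sgnB x y ≠ ps then (pe + 1, sgnB x y) else (2, sgnB x y)) = (d0 + 1, 1) := by
        rcases hps3 with h' | h' | h' <;> subst h' <;> simp_all [uV, dV]
      rw [hextd] at hdK
      simp only [maxEnds, hq, pFst, pSnd] at hME
      simp only [endAux, hq, pFst, pSnd] at hJ
      have hJnext : junct (y :: l2) ((d0 + 1, 1) :: endAux y (d0 + 1) 1 l2) (startScan (y :: l2)) 1 ≤ K :=
        le_trans (junct_cons_ge _ _ _ _ _ _ _) hJ
      have hD : d0 + ext (-1) y l2 ≤ K := by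
        cases l2 with
        | nil => simp only [ext]; omega
        | cons z l3 =>
          rcases lt_trichotomy y z with h' | h' | h'
          · have hs2 := sgnB_lt h'
            have hsxz := sgnB_lt (lt_trans h h')
            have hextd2 : ext (-1) y (z :: l3) = 1 + ext 1 z l3 := by simp [ext, hs2]
            rw [startScan_cons, startScan_cons] at hJ
            have hC := le_trans (junct_head l3 x y z pe ps _ _ _ (1 + ext 0 z l3) (fsgn z l3) _) hJ
            rw [right_eq l3 z _ (by simp [hsxz]), hsxz, left_one pe ps d0 hd0 hps0 hps3] at hC
            simp only [if_pos (by decide : ((1:Int) ≠ 0))] at hC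
            omega
          · have hs2 := sgnB_eq h'
            have hz : ext (-1) y (z :: l3) = 0 := by simp [ext, hs2]
            omega
          · have hs2 := sgnB_gt h'
            have hz : ext (-1) y (z :: l3) = 0 := by simp [ext, hs2]
            omega
      simp only [aLoop, if_pos h]
      exact ih y (max (max r (d1 + 1)) d0) (d1 + 1) (d0 + 1) d0 1 (d0 + 1) 1 K
        (by simp [uV]) (by simp [dV]) (by omega) (by omega) (by tauto) (by omega) (by omega)
        (by omega) (by omega) (by omega) (by omega) hJnext
    · -- x = y : flat step
      have hs1 := sgnB_eq h
      have hq : (if sgnB x y = 0 then ((1:Int), (0:Int)) else if sgnB x y ≠ ps then (pe + 1, sgnB x y) else (2, sgnB x y)) = (1, 0) := by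
        simp [hs1]
      simp only [maxEnds, hq, pFst, pSnd] at hME
      simp only [endAux, hq, pFst, pSnd] at hJ
      have hJnext : junct (y :: l2) ((1, 0) :: endAux y 1 0 l2) (startScan (y :: l2)) 1 ≤ K :=
        le_trans (junct_cons_ge _ _ _ _ _ _ _) hJ
      have hC : u0 + ext 1 y l2 ≤ K := by
        cases l2 with
        | nil => simp only [ext]; omega
        | cons z l3 =>
          rcases lt_trichotomy y z with h' | h' | h'
          · have hs2 := sgnB_lt h'
            have hz : ext 1 y (z :: l3) = 0 := by simp [ext, hs2]
            omega
          · have hs2 := sgnB_eq h'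
            have hz : ext 1 y (z :: l3) = 0 := by simp [ext, hs2]
            omega
          · have hs2 := sgnB_gt h'
            have hsxz : sgnB x z = -1 := sgnB_gt (h ▸ h')
            have hext2 : ext 1 y (z :: l3) = 1 + ext (-1) z l3 := by simp [ext, hs2]
            rw [startScan_cons, startScan_cons] at hJ
            have hCc := le_trans (junct_head l3 x y z pe ps _ _ _ (1 + ext 0 z l3) (fsgn z l3) _) hJ
            rw [right_eq l3 z _ (by simp [hsxz]), hsxz, left_neg pe ps u0 hu0 hps0 hps3] at hCc
            simp only [if_pos (by decide : ((-1:Int) ≠ 0))] at hCc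
            omega
      have hD : d0 + ext (-1) y l2 ≤ K := by
        cases l2 with
        | nil => simp only [ext]; omega
        | cons z l3 =>
          rcases lt_trichotomy y z with h' | h' | h'
          · have hs2 := sgnB_lt h'
            have hsxz : sgnB x z = 1 := sgnB_lt (h ▸ h')
            have hext2 : ext (-1) y (z :: l3) = 1 + ext 1 z l3 := by simp [ext, hs2]
            rw [startScan_cons, startScan_cons] at hJ
            have hCc := le_trans (junct_head l3 x y z pe ps _ _ _ (1 + ext 0 z l3) (fsgn z l3) _) hJ
            rw [right_eq l3 z _ (by simp [hsxz]), hsxz, left_one pe ps d0 hd0 hps0 hps3] at hCc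
            simp only [if_pos (by decide : ((1:Int) ≠ 0))] at hCc
            omega
          · have hs2 := sgnB_eq h'
            have hz : ext (-1) y (z :: l3) = 0 := by simp [ext, hs2]
            omega
          · have hs2 := sgnB_gt h'
            have hz : ext (-1) y (z :: l3) = 0 := by simp [ext, hs2]
            omega
      simp only [aLoop, if_neg (by omega : ¬ x < y), if_neg (by omega : ¬ y < x)]
      exact ih y (max (max r u0) d0) u0 1 d0 1 1 0 K
        (by simp [uV]) (by simp [dV]) (by omega) (by omega) (by tauto) (by omega) (by omega)
        (by omega) hC hD (by omega) hJnext
    · -- y < x : down step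
      have hs1 := sgnB_gt h
      have hext1 : ext 1 x (y :: l2) = 1 + ext (-1) y l2 := by simp [ext, hs1]
      have hq : (if sgnB x y = 0 then ((1:Int), (0:Int)) else if sgnB x y ≠ ps then (pe + 1, sgnB x y) else (2, sgnB x y)) = (u0 + 1, -1) := by
        rcases hps3 with h' | h' | h' <;> subst h' <;> simp_all [uV, dV]
      rw [hext1] at huK
      simp only [maxEnds, hq, pFst, pSnd] at hME
      simp only [endAux, hq, pFst, pSnd] at hJ
      have hJnext : junct (y :: l2) ((u0 + 1, -1) :: endAux y (u0 + 1) (-1) l2) (startScan (y :: l2)) 1 ≤ K :=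
        le_trans (junct_cons_ge _ _ _ _ _ _ _) hJ
      have hC : u0 + ext 1 y l2 ≤ K := by
        cases l2 with
        | nil => simp only [ext]; omega
        | cons z l3 =>
          rcases lt_trichotomy y z with h' | h' | h'
          · have hs2 := sgnB_lt h'
            have hz : ext 1 y (z :: l3) = 0 := by simp [ext, hs2]
            omega
          · have hs2 := sgnB_eq h'
            have hz : ext 1 y (z :: l3) = 0 := by simp [ext, hs2]
            omega
          · have hs2 := sgnB_gt h'
            have hsxz : sgnB x z = -1 := sgnB_gt (lt_trans h' h)
            have hext2 : ext 1 y (z :: l3) = 1 + ext (-1) z l3 := by simp [ext, hs2]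
            rw [startScan_cons, startScan_cons] at hJ
            have hCc := le_trans (junct_head l3 x y z pe ps _ _ _ (1 + ext 0 z l3) (fsgn z l3) _) hJ
            rw [right_eq l3 z _ (by simp [hsxz]), hsxz, left_neg pe ps u0 hu0 hps0 hps3] at hCc
            simp only [if_pos (by decide : ((-1:Int) ≠ 0))] at hCc
            omega
      simp only [aLoop, if_neg (by omega : ¬ x < y), if_pos h]
      exact ih y (max (max r u0) (u1 + 1)) u0 1 (u1 + 1) (u0 + 1) (u0 + 1) (-1) K
        (by simp [uV]) (by simp [dV]) (by omega) (by omega) (by tauto) (by omega) (by omega)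
        (by omega) hC (by omega) (by omega) hJnext

-- ===== VERDICT (by name: the statement is the Claim_ definition above) =====
theorem longestAlternating_spec : Claim_equal_longestAlternating := by
  unfold Claim_equal_longestAlternating
  intro nums _
  unfold Spec_longestAlternating
  cases nums with
  | nil => rfl
  | cons x rest =>
    show aLoop 1 1 1 1 1 (x :: rest) = _
    simp only [longestAlternating_alt, endScan]
    rw [foldl_endAux rest x 1 0 1 (by omega)]
    have hM1 : 1 ≤ maxEnds x 1 0 rest := maxEnds_ge_pe rest x 1 0
    rw [show max 1 (maxEnds x 1 0 rest) = max (maxEnds x 1 0 rest) 1 from by omega]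
    rw [junct_acc]
    apply le_antisymm
    · exact aLoop_le rest x 1 1 1 1 1 1 0 _
        (by simp [uV]) (by simp [dV]) (by omega) (by omega) (by tauto) (by omega) (by omega)
        (by omega)
        (le_trans (ext_le_maxEnds_one rest x 1 0) (by omega))
        (le_trans (ext_le_maxEnds_one rest x (-1) 0) (by omega))
        (le_max_left _ _)
        (le_trans (le_max_right _ _) (le_refl _))
    · apply max_le
      · exact maxEnds_le_aLoop rest x 1 1 1 1 1 1 0
          (by simp [uV]) (by simp [dV]) (by omega) (by omega) (by tauto)
          (by omega) (by omega) (by omega) (by omega) (by omega)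
      · exact junct_le_aLoop rest x 1 1 1 1 1 1 0
          (by simp [uV]) (by simp [dV]) (by omega) (by omega) (by tauto)
          (by omega) (by omega) (by omega) (by omega) (by omega) (by omega)
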